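-- pv_equiv track=rewrite | github.com/Limpid0207/COMP9021 | Quizzes/week2/my_quiz_2.py | increasing_sequence_from
-- ===== SOURCE A (Python) =====
-- def increasing_sequence_from(n, L):
--     if n not in L:
--         return []
--     L1 = [n]
--     current_max = n
--     i = L.index(n)
--     while i < len(L):
--         temp = int(L[i])
--         if temp > current_max:
--             current_max = temp
--             L1.append(current_max)
--         i += 1
--     i = 0
--     while i < L.index(n):
--         temp = int(L[i])
--         if temp > current_max:
--             current_max = temp
--             L1.append(current_max)
--         i += 1
--     return L1
-- ===== SOURCE B (Python) =====
-- def increasing_sequence_from(n, L):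
--     if n not in L:
--         return []
--     i = L.index(n)
--     rotated = L[i:] + L[:i]
--     pm = []
--     m = rotated[0]
--     for x in rotated:
--         m = max(m, x)
--         pm.append(m)
--     return [n] + [b for a, b in zip(pm, pm[1:]) if b > a]
-- ===== Notes on version B (the rewrite author's own statement) =====
-- stated objective: alternative
-- what changed: Instead of threading one running-max accumulator through two index-based while loops that append records in place, B rotates the list to start at n's first position, builds a prefix-maximum table over the rotation, and emits exactly the strict increases of that table in a separate pairwise diff pass.
import Mathlib
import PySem

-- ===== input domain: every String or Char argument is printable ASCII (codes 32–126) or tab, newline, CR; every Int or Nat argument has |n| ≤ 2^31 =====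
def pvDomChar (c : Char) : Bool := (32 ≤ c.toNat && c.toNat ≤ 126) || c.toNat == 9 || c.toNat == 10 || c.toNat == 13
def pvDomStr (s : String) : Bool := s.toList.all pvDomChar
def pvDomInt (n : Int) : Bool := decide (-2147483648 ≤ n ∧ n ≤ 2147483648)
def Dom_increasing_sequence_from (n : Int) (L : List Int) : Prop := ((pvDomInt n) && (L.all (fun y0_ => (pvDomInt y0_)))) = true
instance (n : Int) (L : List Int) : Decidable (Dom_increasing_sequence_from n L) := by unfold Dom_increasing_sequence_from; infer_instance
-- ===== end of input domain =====

-- B replaces A's two accumulator-threading while loops by rotation + a prefix-maximum table + a pairwise diff pass (alternative decomposition, same cost).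


-- ===== PORT A =====
-- one while loop 'while i < stop: temp = int(L[i]); if temp > cm: cm = temp; L1.append(cm); i += 1'
-- (int() is the identity on the Int elements; every index passed is in range, so L.getD i 0 = L[i])
def pvALoop (L : List Int) (i stop : Nat) (cm : Int) (L1 : List Int) : Int × List Int :=
  if _h : i < stop then
    let temp := L.getD i 0
    if temp > cm then pvALoop L (i+1) stop temp (L1 ++ [temp])
    else pvALoop L (i+1) stop cm L1
  else (cm, L1)
termination_by stop - i

def increasing_sequence_from (n : Int) (L : List Int) : List Int :=
  if n ∈ L then
    let i := (PySem.List.index? L n).getD 0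
    let r1 := pvALoop L i L.length n [n]
    (pvALoop L 0 i r1.1 r1.2).2
  else []

-- ===== PORT B =====
-- 'for x in rotated: m = max(m, x); pm.append(m)' with m initialised to rotated[0]
def pvPmGo (m : Int) : List Int → List Int
  | [] => []
  | x :: rest => max m x :: pvPmGo (max m x) rest

-- '[b for a, b in zip(pm, pm[1:]) if b > a]'
def pvDiff : List Int → List Int
  | a :: b :: rest => (if b > a then [b] else []) ++ pvDiff (b :: rest)
  | _ => []

def increasing_sequence_from_alt (n : Int) (L : List Int) : List Int :=
  if n ∈ L then
    let i := (PySem.List.index? L n).getD 0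
    let rotated := L.drop i ++ L.take i      -- L[i:] + L[:i]
    let pm := match rotated with
              | [] => []
              | x :: _ => pvPmGo x rotated
    n :: pvDiff pm
  else []

-- ===== PRECONDITION & SPEC =====
def Spec_increasing_sequence_from (n : Int) (L : List Int) (out : List Int) : Prop := out = increasing_sequence_from_alt n L
instance (n : Int) (L : List Int) (out : List Int) : Decidable (Spec_increasing_sequence_from n L out) := by unfold Spec_increasing_sequence_from; infer_instance

-- ===== CLAIM (what is proved, stated in full; the proofs are below) =====
def Claim_equal_increasing_sequence_from : Prop := ∀ (n : Int) (L : List Int), Dom_increasing_sequence_from n L → Spec_increasing_sequence_from n L (increasing_sequence_from n L)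

-- ===== LEMMAS AND PROOFS =====

-- the body of A's loop, as a fold step over the visited element
def pvStep (s : Int × List Int) (x : Int) : Int × List Int :=
  if x > s.1 then (x, s.2 ++ [x]) else s

-- the strictly-increasing record values of xs above cm
def pvRecs (cm : Int) : List Int → List Int
  | [] => []
  | x :: xs => if x > cm then x :: pvRecs x xs else pvRecs cm xs

theorem pvALoop_eq_foldl (L : List Int) (stop : Nat) (hstop : stop ≤ L.length) :
    ∀ i cm acc, pvALoop L i stop cm acc = List.foldl pvStep (cm, acc) ((L.take stop).drop i) := by
  suffices H : ∀ (k i : Nat) (cm : Int) (acc : List Int), stop - i ≤ k →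
      pvALoop L i stop cm acc = List.foldl pvStep (cm, acc) ((L.take stop).drop i) by
    intro i cm acc; exact H (stop - i) i cm acc (le_refl _)
  intro k
  induction k with
  | zero =>
    intro i cm acc hk
    have h : ¬ i < stop := by omega
    have : (L.take stop).drop i = [] := by
      apply List.drop_eq_nil_of_le; simp; omega
    rw [pvALoop]
    simp [h, this]
  | succ k ih =>
    intro i cm acc hk
    rw [pvALoop]
    by_cases h : i < stop
    · have hlen : i < (L.take stop).length := by simp; omega
      have hdrop : (L.take stop).drop i = (L.take stop)[i] :: (L.take stop).drop (i+1) :=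
        List.drop_eq_getElem_cons hlen
      have hget : (L.take stop)[i] = L.getD i 0 := by
        rw [List.getElem_take, List.getD_eq_getElem L 0 (by omega)]
      simp only [h, dif_pos, hdrop, hget, List.foldl_cons]
      by_cases hx : L.getD i 0 > cm
      · rw [if_pos hx]
        simp only [pvStep, if_pos hx]
        exact ih (i+1) _ _ (by omega)
      · rw [if_neg hx]
        simp only [pvStep, if_neg hx]
        exact ih (i+1) _ _ (by omega)
    · have : (L.take stop).drop i = [] := by
        apply List.drop_eq_nil_of_le; simp; omega
      simp [h, this]

theorem foldl_pvStep_snd : ∀ (xs : List Int) (cm : Int) (acc : List Int),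
    (List.foldl pvStep (cm, acc) xs).2 = acc ++ pvRecs cm xs := by
  intro xs
  induction xs with
  | nil => simp [pvRecs]
  | cons x xs ih =>
    intro cm acc
    simp only [List.foldl_cons, pvStep, pvRecs]
    by_cases hx : x > cm
    · simp [hx, ih]
    · simp [hx, ih]

theorem pvDiff_pmGo : ∀ (xs : List Int) (m : Int), pvDiff (m :: pvPmGo m xs) = pvRecs m xs := by
  intro xs
  induction xs with
  | nil => simp [pvPmGo, pvDiff, pvRecs]
  | cons x xs ih =>
    intro m
    by_cases hx : x > m
    · have hmax : max m x = x := by omega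
      simp only [pvPmGo, pvDiff, pvRecs, hmax, if_pos hx, ih]
      simp
    · have hmax : max m x = m := by omega
      simp only [pvPmGo, pvDiff, pvRecs, hmax, if_neg hx, ih]
      simp

-- ===== VERDICT (by name: the statement is the Claim_ definition above) =====
theorem increasing_sequence_from_spec : Claim_equal_increasing_sequence_from := by
  intro n L _
  unfold Spec_increasing_sequence_from increasing_sequence_from increasing_sequence_from_alt
  by_cases hmem : n ∈ L
  · simp only [hmem, if_pos]
    -- facts about the start index
    obtain ⟨k, hk⟩ := Option.isSome_iff_exists.mp ((PySem.List.index?_isSome_iff L n).mpr hmem)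
    obtain ⟨hklen, hget, -⟩ := PySem.List.getElem_of_index?_eq_some hk
    rw [hk]
    simp only [Option.getD_some]
    have hdropk : L.drop k = n :: L.drop (k+1) := by
      rw [List.drop_eq_getElem_cons hklen, hget]
    -- A's side: two loops = one fold over the rotation
    rw [pvALoop_eq_foldl L L.length (le_refl _) k n [n],
        pvALoop_eq_foldl L k (le_of_lt hklen) 0 _ _]
    simp only [List.take_length, List.drop_zero]
    rw [← List.foldl_append, foldl_pvStep_snd]
    -- B's side
    rw [hdropk]
    simp only [List.cons_append]
    rw [pvPmGo, pvDiff_pmGo]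
    have : max n n = n := by omega
    rw [this]
    simp [pvRecs]
  · simp [hmem]
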